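-- pv_equiv track=rewrite | github.com/ShammingWang/calibration | plot_mocap_points.py | reverse_each_sector
-- ===== SOURCE A (Python) =====
-- def reverse_each_sector(lines, sector_size: int):
--     """Reverse the order of lines within each consecutive sector."""
--
--     if sector_size <= 0:
--         raise ValueError("sector_size must be a positive integer")
--
--     out = []
--     for start in range(0, len(lines), sector_size):
--         chunk = lines[start : start + sector_size]
--         out.extend(reversed(chunk))
--     return out
-- ===== SOURCE B (Python) =====
-- def reverse_each_sector(lines, sector_size: int):
--     """Reverse the order of lines within each consecutive sector."""
--
--     if sector_size <= 0:
--         raise ValueError("sector_size must be a positive integer")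
--
--     n = len(lines)
--     return [lines[(i // sector_size) * sector_size
--                   + min(sector_size, n - (i // sector_size) * sector_size)
--                   - 1 - (i % sector_size)]
--             for i in range(n)]
-- ===== Notes on version B (the rewrite author's own statement) =====
-- stated objective: alternative
-- what changed: B builds the output in one list comprehension by index arithmetic (sector, offset, partial-sector length) instead of slicing each sector and extending with its reversal.
import Mathlib
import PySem

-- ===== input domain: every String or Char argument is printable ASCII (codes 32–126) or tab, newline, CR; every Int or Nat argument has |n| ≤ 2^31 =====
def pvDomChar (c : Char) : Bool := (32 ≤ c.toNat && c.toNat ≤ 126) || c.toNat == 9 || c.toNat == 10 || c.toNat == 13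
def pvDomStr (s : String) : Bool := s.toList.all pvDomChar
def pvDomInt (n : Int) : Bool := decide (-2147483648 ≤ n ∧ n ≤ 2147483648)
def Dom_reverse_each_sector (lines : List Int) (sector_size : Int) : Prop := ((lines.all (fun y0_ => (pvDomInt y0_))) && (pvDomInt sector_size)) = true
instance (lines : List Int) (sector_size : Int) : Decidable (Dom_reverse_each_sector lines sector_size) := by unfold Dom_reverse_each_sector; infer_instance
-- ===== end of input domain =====

-- B replaces A's slice-and-reverse loop over sectors by a single comprehension
-- filling each output position by index arithmetic; objective: alternative decomposition.

-- ===== PORT A =====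
-- the 'for start in range(0, len(lines), sector_size)' loop: start advances by
-- sector_size = k1+1 (k1 = sector_size - 1, so the step is positive by construction)
def revSecGo (lines : List Int) (k1 : Nat) (start : Nat) : List Int :=
  if start < lines.length then
    (PySem.List.slice lines (some (start : Int)) (some ((start : Int) + ((k1 : Int) + 1)))).reverse
      ++ revSecGo lines k1 (start + (k1 + 1))
  else []
termination_by lines.length - start
decreasing_by omega

def reverse_each_sector (lines : List Int) (sector_size : Int) : List Int :=
  if sector_size ≤ 0 then [] else revSecGo lines (sector_size.toNat - 1) 0

-- ===== PORT B =====
def reverse_each_sector_alt (lines : List Int) (sector_size : Int) : List Int :=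
  if sector_size ≤ 0 then []
  else
    let n : Int := lines.length
    (PySem.List.pyRange 0 n 1).map (fun i =>
      PySem.List.pyGetD lines
        ((PySem.Int.floordiv i sector_size) * sector_size
          + min sector_size (n - (PySem.Int.floordiv i sector_size) * sector_size)
          - 1 - PySem.Int.mod i sector_size) 0)

-- ===== PRECONDITION & SPEC =====
-- Pre_ excludes exactly sector_size ≤ 0, where Python A raises ValueError.
def Pre_reverse_each_sector (lines : List Int) (sector_size : Int) : Prop := 0 < sector_size
instance (lines : List Int) (sector_size : Int) : Decidable (Pre_reverse_each_sector lines sector_size) := by unfold Pre_reverse_each_sector; infer_instance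
def pvWitness_reverse_each_sector : List Int × Int := ([1, 2, 3, 4, 5], 2)

def Spec_reverse_each_sector (lines : List Int) (sector_size : Int) (out : List Int) : Prop := out = reverse_each_sector_alt lines sector_size
instance (lines : List Int) (sector_size : Int) (out : List Int) : Decidable (Spec_reverse_each_sector lines sector_size out) := by unfold Spec_reverse_each_sector; infer_instance

-- ===== CLAIM (what is proved, stated in full; the proofs are below) =====
def Claim_equal_reverse_each_sector : Prop := ∀ (lines : List Int) (sector_size : Int), Dom_reverse_each_sector lines sector_size → Pre_reverse_each_sector lines sector_size → Spec_reverse_each_sector lines sector_size (reverse_each_sector lines sector_size)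

-- ===== LEMMAS AND PROOFS =====

-- canonical form: reverse the first sector, recurse on the rest
def specRev (k1 : Nat) (l : List Int) : List Int :=
  if h : l = [] then [] else (l.take (k1 + 1)).reverse ++ specRev k1 (l.drop (k1 + 1))
termination_by l.length
decreasing_by
  have : 0 < l.length := List.length_pos_iff.mpr h
  simp [List.length_drop]; omega

-- the Nat-valued index B reads from, for position j in a list of length n, sector size k
def natIdx (k n j : Nat) : Nat := (j / k) * k + min k (n - (j / k) * k) - 1 - j % k

theorem goA_eq_spec (lines : List Int) (k1 : Nat) (start : Nat) :
    revSecGo lines k1 start = specRev k1 (lines.drop start) := by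
  by_cases h : start < lines.length
  · rw [revSecGo, if_pos h, goA_eq_spec lines k1 (start + (k1 + 1))]
    have hs : ((start : Int) + ((k1 : Int) + 1)) = ((start + (k1 + 1) : Nat) : Int) := by
      push_cast; ring
    rw [hs, PySem.List.slice_natCast]
    have hd : lines.drop start ≠ [] := by
      simp [List.drop_eq_nil_iff]; omega
    conv_rhs => rw [specRev.eq_def]
    rw [dif_neg hd]
    have h1 : start + (k1 + 1) - start = k1 + 1 := by omega
    have h2 : (lines.drop start).drop (k1 + 1) = lines.drop (start + (k1 + 1)) := by
      rw [List.drop_drop]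
    rw [h1]
    try rw [h2]
  · rw [revSecGo, if_neg h]
    have hnil : lines.drop start = [] := by rw [List.drop_eq_nil_iff]; omega
    rw [hnil, specRev.eq_def]; simp
termination_by lines.length - start
decreasing_by omega

theorem bmap_eq_spec (k : Nat) (hk : 0 < k) (lines : List Int) :
    (List.range lines.length).map (fun j => lines.getD (natIdx k lines.length j) 0)
      = specRev (k - 1) lines := by
  rcases eq_or_ne lines [] with h | h
  · subst h; rw [specRev.eq_def]; simp
  · have hnpos : 0 < lines.length := List.length_pos_iff.mpr h
    rw [specRev.eq_def, dif_neg h]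
    have hk1 : k - 1 + 1 = k := by omega
    rw [hk1]
    have hsplit : List.range lines.length
        = List.range (min k lines.length)
          ++ (List.range (lines.length - min k lines.length)).map (min k lines.length + ·) := by
      conv_lhs =>
        rw [show lines.length = min k lines.length + (lines.length - min k lines.length) by omega]
      rw [List.range_add]
    rw [hsplit, List.map_append, List.map_map]
    congr 1
    · -- first sector: positions j < min k lines.length read lines[min k lines.length - 1 - j]
      apply List.ext_getElem
      · simp
      · intro i h1 h2
        simp only [List.getElem_map, List.getElem_range, List.getElem_reverse]
        have hi : i < min k lines.length := by simpa using h1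
        have hdiv : i / k = 0 := Nat.div_eq_of_lt (by omega)
        have hmod : i % k = i := Nat.mod_eq_of_lt (by omega)
        have hidx : natIdx k lines.length i = min k lines.length - 1 - i := by
          unfold natIdx; rw [hdiv, hmod]; simp
        rw [hidx]
        have htl : (List.take k lines).length = min k lines.length := by simp
        have h3 : (List.take k lines).length - 1 - i < lines.length := by
          rw [htl]; omega
        rw [List.getElem_take]
        simp only [List.length_take]
        rw [List.getD_eq_getElem lines 0 (by omega)]
    · -- remaining sectors: shift by k and recurse on lines.drop k
      rcases Nat.lt_or_ge lines.length k with hnk | hnk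
      · have hmn : min k lines.length = lines.length := by omega
        have hd : lines.drop k = [] := by rw [List.drop_eq_nil_iff]; omega
        rw [hmn, hd, specRev.eq_def]
        simp
      · have hmk : min k lines.length = k := by omega
        rw [hmk]
        have hlen : (lines.drop k).length = lines.length - k := by simp
        have IH := bmap_eq_spec k hk (lines.drop k)
        rw [hlen] at IH
        rw [← IH]
        apply List.map_congr_left
        intro i hi
        rw [List.mem_range] at hi
        simp only [Function.comp]
        have hc : k + i = i + k := by omega
        rw [hc]
        have hdiv : (i + k) / k = i / k + 1 := Nat.add_div_right _ hk
        have hmod : (i + k) % k = i % k := Nat.add_mod_right _ _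
        have hb : i / k * k ≤ i := Nat.div_mul_le_self i k
        have hmodlt : i % k < k := Nat.mod_lt _ hk
        have hrep : i / k * k + i % k = i := Nat.div_add_mod' i k
        have hidx : natIdx k lines.length (i + k) = k + natIdx k (lines.length - k) i := by
          unfold natIdx
          rw [hdiv, hmod]
          have h1 : (i / k + 1) * k = i / k * k + k := by ring
          rw [h1]
          omega
        rw [hidx, List.getD_eq_getElem?_getD, List.getD_eq_getElem?_getD,
            List.getElem?_drop]
termination_by lines.length
decreasing_by simp; omega

-- ===== VERDICT (by name: the statement is the Claim_ definition above) =====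
theorem reverse_each_sector_spec : Claim_equal_reverse_each_sector := by
  intro lines s _ hpre
  have hs : ¬ s ≤ 0 := not_le.mpr hpre
  unfold Spec_reverse_each_sector reverse_each_sector reverse_each_sector_alt
  rw [if_neg hs, if_neg hs]
  set k := s.toNat with hk
  have hkpos : 0 < k := by omega
  have hsk : s = (k : Int) := by omega
  rw [goA_eq_spec lines (k - 1) 0, List.drop_zero]
  rw [← bmap_eq_spec k hkpos lines]
  simp only [PySem.List.pyRange_zero_natCast, List.map_map]
  apply List.map_congr_left
  intro j hj
  rw [List.mem_range] at hj
  simp only [Function.comp]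
  -- evaluate B's Int arithmetic at the natural index j
  have hfd : PySem.Int.floordiv (j : Int) s = ((j / k : Nat) : Int) := by
    rw [hsk]; exact PySem.Int.floordiv_natCast j k
  have hfm : PySem.Int.mod (j : Int) s = ((j % k : Nat) : Int) := by
    rw [hsk]; exact PySem.Int.mod_natCast j k
  rw [hfd, hfm, hsk]
  have hb : j / k * k ≤ j := Nat.div_mul_le_self j k
  have hmodlt : j % k < k := Nat.mod_lt _ hkpos
  have hrep : j / k * k + j % k = j := Nat.div_add_mod' j k
  have hble : j / k * k ≤ lines.length := by omega
  have hmin : min (k : Int) ((lines.length : Int) - ((j / k : Nat) : Int) * (k : Int))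
      = ((min k (lines.length - j / k * k) : Nat) : Int) := by
    rw [← Nat.cast_mul, ← Nat.cast_sub hble, ← Nat.cast_min]
  have hidx : ((j / k : Nat) : Int) * (k : Int)
        + min (k : Int) ((lines.length : Int) - ((j / k : Nat) : Int) * (k : Int))
        - 1 - ((j % k : Nat) : Int) = ((natIdx k lines.length j : Nat) : Int) := by
    rw [hmin, ← Nat.cast_mul]
    unfold natIdx
    omega
  rw [hidx, PySem.List.pyGetD_natCast]
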